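-- pv_equiv track=rewrite | github.com/pratu16x7/kaleidoscope | solver/puzzle.py | get_edge_grid
-- ===== SOURCE A (Python) =====
-- def get_edge_grid(grid):
--   # uldr = 0000
--
--   u_edge = '1000'
--   no_edge = '0000'
--
--   dir_nos = {
--     'r': 1,
--     'd': 10,
--     'l': 100,
--     'u': 1000
--   }
--
--   grid_w = len(grid[0])
--
--   def add_edge(edges, edge):
--     num = int(edges) + dir_nos[edge]
--     return "{:04d}".format(num)
--     # return str().zfill(4)
--
--   edge_grid = []
--
--   # Set row level prev
--   prev_edges_row = []
--   # Just
--   prev_cell_row = []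
--
--   for cell_row in grid:
--     # Your guinea pig, row level
--     curr_edges_row = [no_edge] * grid_w
--
--     # if not prev_edges_row:
-- #       curr_edges_row = [u_edge] * grid_w
--
--     # Set cell level prev
--     prev_edge = None
--     # Just
--     cell_prev = None
--
--     for idx, cell in enumerate(cell_row):
--       # Your guinea pig, cell level
--       curr_edge = curr_edges_row[idx]
--
--       if not cell_prev:
--         curr_edge = add_edge(curr_edge, 'l')
--
--       if cell:
--         if cell_prev and cell_prev['color'] == cell['color']:
--           curr_edge = add_edge(curr_edge, 'l')
--           prev_edge = add_edge(prev_edge, 'r')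
--
--         if prev_cell_row and prev_cell_row[idx] and prev_cell_row[idx]['color'] == cell['color']:
--           # Put down in that one and up in current
--           prev_edges_row[idx] = add_edge(prev_edges_row[idx], 'd')
--           curr_edge = add_edge(curr_edge, 'u')
--
--         elif not prev_cell_row or not prev_cell_row[idx]:
--           curr_edge = add_edge(curr_edge, 'u')
--
--       else:
--         if cell_prev:
--           prev_edge = add_edge(prev_edge, 'r')
--
--         if prev_cell_row and prev_cell_row[idx]:
--           prev_edges_row[idx] = add_edge(prev_edges_row[idx], 'd')
--
--
--       # Add PREV edge to row, and update it
--       if idx > 0: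
--         curr_edges_row[idx-1] = prev_edge
--       prev_edge = curr_edge
--       # Just
--       cell_prev = cell
--
--
--     # Update the right for end of row
--     prev_edge = add_edge(prev_edge, 'r')
--     curr_edges_row[grid_w-1] = prev_edge
--
--
--     # Add PREV row to grid, and update it
--     if prev_edges_row:
--       edge_grid.append(prev_edges_row)
--     prev_edges_row = curr_edges_row
--     # Just
--     prev_cell_row = cell_row
--
--
--
--   # Update the down for end of grid
--   prev_edges_row = [add_edge(edge, 'd') for edge in prev_edges_row]
--   edge_grid.append(prev_edges_row)
--
--   return edge_grid
-- ===== SOURCE B (Python) =====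
-- def get_edge_grid(grid):
--     h, w = len(grid), len(grid[0])
--     edge_grid = []
--     for r, row in enumerate(grid):
--         out_row = []
--         for c, cell in enumerate(row):
--             left = row[c - 1] if c > 0 else None
--             right = row[c + 1] if c < w - 1 else None
--             above = grid[r - 1][c] if r > 0 else None
--             below = grid[r + 1][c] if r < h - 1 else None
--             u = bool(cell) and (not above or above['color'] == cell['color'])
--             l = (not left) or (bool(cell) and left['color'] == cell['color'])
--             d = r == h - 1 or (bool(cell) and (not below or below['color'] == cell['color']))
--             rt = c == w - 1 or (bool(cell) and (not right or right['color'] == cell['color']))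
--             out_row.append(''.join('1' if b else '0' for b in (u, l, d, rt)))
--         edge_grid.append(out_row)
--     return edge_grid
-- ===== Notes on version B (the rewrite author's own statement) =====
-- stated objective: simpler
-- what changed: Replaces A's deferred-write bookkeeping (prev_edge / prev_edges_row mutated while processing the NEXT cell/row, plus int-parse-and-reformat edge-code arithmetic) by a direct local stencil: each cell's 4-bit 'uldr' string is computed in one place from its four neighbours and the boundary flags.
-- outside the precondition, e.g. on get_edge_grid([[None, None], [None]]): A returns [['0100', '0101'], ['0010', '0111']], B raises IndexError
import Mathlib
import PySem

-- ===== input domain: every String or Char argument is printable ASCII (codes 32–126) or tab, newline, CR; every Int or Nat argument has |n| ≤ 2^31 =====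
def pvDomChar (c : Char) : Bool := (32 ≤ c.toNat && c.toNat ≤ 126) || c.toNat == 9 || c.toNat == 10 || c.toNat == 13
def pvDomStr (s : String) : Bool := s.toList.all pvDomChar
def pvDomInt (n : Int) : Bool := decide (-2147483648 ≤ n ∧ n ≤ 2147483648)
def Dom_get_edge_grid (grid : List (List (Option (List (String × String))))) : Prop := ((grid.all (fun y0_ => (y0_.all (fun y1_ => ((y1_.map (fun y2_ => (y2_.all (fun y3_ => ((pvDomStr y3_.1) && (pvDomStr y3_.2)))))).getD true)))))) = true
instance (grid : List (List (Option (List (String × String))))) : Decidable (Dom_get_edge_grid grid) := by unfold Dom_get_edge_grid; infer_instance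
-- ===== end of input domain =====

-- B computes each cell's 4-bit edge code locally from its neighbours instead of A's
-- deferred-write bookkeeping; equivalence is about the return value (A mutates nothing).

-- ===== PORT A =====

-- a cell: None / a dict (assoc list); truthiness of a Python dict = nonempty
def pvTruthy (c : Option (List (String × String))) : Bool :=
  match c with
  | none => false
  | some d => !d.isEmpty

-- cell['color'] : first match in the assoc list (none = KeyError, excluded by Pre_)
def pvColor (c : Option (List (String × String))) : Option String :=
  match c with
  | none => none
  | some d => List.lookup "color" d

def pvDirNo (e : String) : Int :=
  if e = "r" then 1 else if e = "d" then 10 else if e = "l" then 100 else 1000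

-- add_edge: int(edges) + dir_nos[edge], then "{:04d}".format  (= str(num).zfill(4))
def pvAddEdge (edges : String) (e : String) : String :=
  PySem.Str.zfill (PySem.Int.toStr ((PySem.Int.ofStr? edges).getD 0 + pvDirNo e)) 4

structure PvAState where
  curr : List String
  prevEdges : List String
  prevEdge : Option String          -- None before the first cell; add_edge on None raises (outside Pre_)
  cellPrev : Option (List (String × String))
  idx : Nat

def pvInnerStep (prevCellRow : List (Option (List (String × String))))
    (s : PvAState) (cell : Option (List (String × String))) : PvAState :=
  let idx := s.idx
  let ce0 := s.curr.getD idx ""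
  let ce1 := if !pvTruthy s.cellPrev then pvAddEdge ce0 "l" else ce0
  let res : String × List String × Option String :=
    if pvTruthy cell then
      let cepe :=
        if pvTruthy s.cellPrev && (pvColor s.cellPrev == pvColor cell) then
          (pvAddEdge ce1 "l", s.prevEdge.map (fun x => pvAddEdge x "r"))
        else (ce1, s.prevEdge)
      let above := prevCellRow.getD idx none
      if !prevCellRow.isEmpty && pvTruthy above && (pvColor above == pvColor cell) then
        (pvAddEdge cepe.1 "u", s.prevEdges.set idx (pvAddEdge (s.prevEdges.getD idx "") "d"), cepe.2)
      else if prevCellRow.isEmpty || !pvTruthy above then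
        (pvAddEdge cepe.1 "u", s.prevEdges, cepe.2)
      else (cepe.1, s.prevEdges, cepe.2)
    else
      let pe := if pvTruthy s.cellPrev then s.prevEdge.map (fun x => pvAddEdge x "r") else s.prevEdge
      let pes := if !prevCellRow.isEmpty && pvTruthy (prevCellRow.getD idx none) then
          s.prevEdges.set idx (pvAddEdge (s.prevEdges.getD idx "") "d")
        else s.prevEdges
      (ce1, pes, pe)
  let curr := if 0 < idx then s.curr.set (idx - 1) (res.2.2.getD "") else s.curr
  ⟨curr, res.2.1, some res.1, cell, idx + 1⟩

structure PvOState where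
  edgeGrid : List (List String)
  prevEdgesRow : List String
  prevCellRow : List (Option (List (String × String)))

def pvOuterStep (w : Nat) (s : PvOState) (row : List (Option (List (String × String)))) : PvOState :=
  let fin := List.foldl (pvInnerStep s.prevCellRow)
    ⟨List.replicate w "0000", s.prevEdgesRow, none, none, 0⟩ row
  let lastEdge := (fin.prevEdge.map (fun x => pvAddEdge x "r")).getD ""
  let curr := fin.curr.set (w - 1) lastEdge
  let eg := if fin.prevEdges.isEmpty then s.edgeGrid else s.edgeGrid ++ [fin.prevEdges]
  ⟨eg, curr, row⟩

def get_edge_grid (grid : List (List (Option (List (String × String))))) : List (List String) :=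
  let w := (grid.headD []).length
  let fin := List.foldl (pvOuterStep w) ⟨[], [], []⟩ grid
  fin.edgeGrid ++ [fin.prevEdgesRow.map (fun e => pvAddEdge e "d")]

-- ===== PORT B =====

def pvBit (b : Bool) : Char := if b then '1' else '0'

def pvBits (u l d r : Bool) : String := String.ofList [pvBit u, pvBit l, pvBit d, pvBit r]

def pvBCell (grid : List (List (Option (List (String × String))))) (h w : Nat)
    (r : Nat) (row : List (Option (List (String × String)))) (c : Nat)
    (cell : Option (List (String × String))) : String :=
  let left  := if 0 < c then row.getD (c - 1) none else none
  let right := if c < w - 1 then row.getD (c + 1) none else none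
  let above := if 0 < r then (grid.getD (r - 1) []).getD c none else none
  let below := if r < h - 1 then (grid.getD (r + 1) []).getD c none else none
  let u := pvTruthy cell && (!pvTruthy above || (pvColor above == pvColor cell))
  let l := !pvTruthy left || (pvTruthy cell && (pvColor left == pvColor cell))
  let d := decide (r = h - 1) || (pvTruthy cell && (!pvTruthy below || (pvColor below == pvColor cell)))
  let rt := decide (c = w - 1) || (pvTruthy cell && (!pvTruthy right || (pvColor right == pvColor cell)))
  pvBits u l d rt

def pvAltRow (grid : List (List (Option (List (String × String))))) (h w r : Nat)
    (row : List (Option (List (String × String)))) :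
    Nat → List (Option (List (String × String))) → List String
  | _, [] => []
  | c, cell :: rest => pvBCell grid h w r row c cell :: pvAltRow grid h w r row (c + 1) rest

def pvAltRows (grid : List (List (Option (List (String × String))))) (h w : Nat) :
    Nat → List (List (Option (List (String × String)))) → List (List String)
  | _, [] => []
  | r, row :: rest => pvAltRow grid h w r row 0 row :: pvAltRows grid h w (r + 1) rest

def get_edge_grid_alt (grid : List (List (Option (List (String × String))))) : List (List String) :=
  pvAltRows grid grid.length (grid.headD []).length 0 grid

-- ===== PRECONDITION & SPEC =====

def pvOkPair (a b : Option (List (String × String))) : Bool :=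
  !(pvTruthy a && pvTruthy b) || ((pvColor a).isSome && (pvColor b).isSome)

-- Pre_ excludes exactly the inputs where the Python A raises: an empty grid / empty first
-- row (IndexError/TypeError), a row longer than the first (IndexError), adjacent truthy
-- cells without a 'color' key (KeyError) — and ragged grids with a SHORTER later row, on
-- which A returns leftover '0000'/misplaced codes but the natural B itself raises IndexError.
def Pre_get_edge_grid (grid : List (List (Option (List (String × String))))) : Prop :=
  grid ≠ [] ∧ 0 < (grid.headD []).length ∧
  (∀ row ∈ grid, row.length = (grid.headD []).length) ∧
  (∀ row ∈ grid, ∀ p ∈ row.zip row.tail, pvOkPair p.1 p.2 = true) ∧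
  (∀ q ∈ grid.zip grid.tail, ∀ p ∈ q.1.zip q.2, pvOkPair p.1 p.2 = true)

instance (grid : List (List (Option (List (String × String))))) : Decidable (Pre_get_edge_grid grid) := by
  unfold Pre_get_edge_grid; infer_instance

def pvWitness_get_edge_grid : (List (List (Option (List (String × String))))) :=
  [[some [("color", "r")], none], [some [("color", "b")], some [("color", "b")]]]

def Spec_get_edge_grid (grid : List (List (Option (List (String × String))))) (out : List (List String)) : Prop := out = get_edge_grid_alt grid
instance (grid : List (List (Option (List (String × String))))) (out : List (List String)) : Decidable (Spec_get_edge_grid grid out) := by unfold Spec_get_edge_grid; infer_instance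

-- ===== CLAIM (what is proved, stated in full; the proofs are below) =====
def Claim_equal_get_edge_grid : Prop := ∀ (grid : List (List (Option (List (String × String))))), Dom_get_edge_grid grid → Pre_get_edge_grid grid → Spec_get_edge_grid grid (get_edge_grid grid)

-- ===== LEMMAS AND PROOFS =====

-- per-cell edge bits, read off the grid locally
def eU (prevRow row : List (Option (List (String × String)))) (c : Nat) : Bool :=
  pvTruthy (row.getD c none) &&
    (!pvTruthy (prevRow.getD c none) || (pvColor (prevRow.getD c none) == pvColor (row.getD c none)))

def eL (row : List (Option (List (String × String)))) (c : Nat) : Bool :=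
  let left := if c = 0 then none else row.getD (c - 1) none
  !pvTruthy left || (pvTruthy (row.getD c none) && (pvColor left == pvColor (row.getD c none)))

def eR (row : List (Option (List (String × String)))) (w c : Nat) : Bool :=
  if c = w - 1 then true
  else pvTruthy (row.getD c none) &&
    (!pvTruthy (row.getD (c + 1) none) || (pvColor (row.getD c none) == pvColor (row.getD (c + 1) none)))

def eD (row nextRow : List (Option (List (String × String)))) (c : Nat) : Bool :=
  pvTruthy (row.getD c none) &&
    (!pvTruthy (nextRow.getD c none) || (pvColor (row.getD c none) == pvColor (nextRow.getD c none)))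

def rowCode (prevRow row : List (Option (List (String × String)))) (w : Nat) : List String :=
  (List.range w).map (fun c => pvBits (eU prevRow row c) (eL row c) false (eR row w c))

def finalRow (w : Nat) (prevRow row : List (Option (List (String × String))))
    (next? : Option (List (Option (List (String × String))))) : List String :=
  (List.range w).map (fun c => pvBits (eU prevRow row c) (eL row c)
    (match next? with | none => true | some nr => eD row nr c) (eR row w c))

def rowsB (w : Nat) : List (Option (List (String × String))) →
    List (List (Option (List (String × String)))) → List (List String)
  | _, [] => []
  | prevRow, row :: rest => finalRow w prevRow row rest.head? :: rowsB w row rest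

-- bit-arithmetic facts about add_edge on well-formed codes
theorem addEdge_l (u d r : Bool) : pvAddEdge (pvBits u false d r) "l" = pvBits u true d r := by
  revert u d r; decide

theorem addEdge_r (u l d : Bool) : pvAddEdge (pvBits u l d false) "r" = pvBits u l d true := by
  revert u l d; decide

theorem addEdge_u (l d r : Bool) : pvAddEdge (pvBits false l d r) "u" = pvBits true l d r := by
  revert l d r; decide

theorem addEdge_d (u l r : Bool) : pvAddEdge (pvBits u l false r) "d" = pvBits u l true r := by
  revert u l r; decide

theorem zero_bits : "0000" = pvBits false false false false := by decide

theorem pvColor_comm (a b : Option (List (String × String))) :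
    (pvColor a == pvColor b) = (pvColor b == pvColor a) := by
  simp [eq_comm]

-- inner-loop invariant state after processing j cells (1 ≤ j ≤ w)
def currAt (prevRow row : List (Option (List (String × String)))) (w j : Nat) : List String :=
  (List.range w).map (fun i => if i + 1 < j then pvBits (eU prevRow row i) (eL row i) false (eR row w i) else "0000")

def dFlag (prevRow row : List (Option (List (String × String)))) (i : Nat) : Bool :=
  !prevRow.isEmpty && eD prevRow row i

def peAt (prevRow row : List (Option (List (String × String)))) (pe0 : List String) (j : Nat) : List String :=
  pe0.mapIdx (fun i e => if i < j ∧ dFlag prevRow row i = true then pvAddEdge e "d" else e)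

def pendAt (prevRow row : List (Option (List (String × String)))) (i : Nat) : String :=
  pvBits (eU prevRow row i) (eL row i) false false

def SState (prevRow row : List (Option (List (String × String)))) (w : Nat) (pe0 : List String) (j : Nat) : PvAState :=
  ⟨currAt prevRow row w j, peAt prevRow row pe0 j, some (pendAt prevRow row (j - 1)), row.getD (j - 1) none, j⟩

theorem currAt_length (pr row : List (Option (List (String × String)))) (w k : Nat) :
    (currAt pr row w k).length = w := by simp [currAt]

theorem currAt_getD (pr row : List (Option (List (String × String)))) (w k j : Nat)
    (h : j < w) (hk : k ≤ j + 1) :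
    (currAt pr row w k).getD j "" = "0000" := by
  rw [List.getD_eq_getElem _ _ (by simp [currAt_length, h])]
  simp only [currAt, List.getElem_map, List.getElem_range]
  rw [if_neg (by omega)]

theorem currAt_set (pr row : List (Option (List (String × String)))) (w j : Nat)
    (hj : 1 ≤ j) (hjw : j ≤ w) :
    (currAt pr row w j).set (j - 1)
      (pvBits (eU pr row (j - 1)) (eL row (j - 1)) false (eR row w (j - 1)))
      = currAt pr row w (j + 1) := by
  apply List.ext_getElem
  · simp [currAt]
  · intro i h1 h2
    simp only [currAt, List.length_map, List.length_range] at h2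
    rw [List.getElem_set]
    simp only [currAt, List.getElem_map, List.getElem_range]
    by_cases hi : j - 1 = i
    · subst hi; rw [if_pos rfl, if_pos (by omega)]
    · rw [if_neg hi]
      by_cases h3 : i + 1 < j
      · rw [if_pos h3, if_pos (by omega)]
      · rw [if_neg h3, if_neg (by omega)]

theorem peAt_length (pr row : List (Option (List (String × String)))) (pe0 : List String) (k : Nat) :
    (peAt pr row pe0 k).length = pe0.length := by simp [peAt]

theorem peAt_getD (pr row : List (Option (List (String × String)))) (pe0 : List String) (j : Nat)
    (h : j < pe0.length) :
    (peAt pr row pe0 j).getD j "" = pe0.getD j "" := by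
  rw [List.getD_eq_getElem _ _ (by simpa [peAt_length] using h), List.getD_eq_getElem _ _ h]
  simp only [peAt, List.getElem_mapIdx]
  rw [if_neg (by omega)]

theorem peAt_succ_noset (pr row : List (Option (List (String × String)))) (pe0 : List String) (j : Nat)
    (h : dFlag pr row j = false) :
    peAt pr row pe0 j = peAt pr row pe0 (j + 1) := by
  apply List.ext_getElem
  · simp [peAt_length]
  · intro i h1 h2
    simp only [peAt, List.getElem_mapIdx]
    by_cases hij : i = j
    · subst hij; rw [if_neg (by omega), if_neg (by simp [h])]
    · by_cases hlt : i < j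
      · have he : (i < j ∧ dFlag pr row i = true) ↔ (i < j + 1 ∧ dFlag pr row i = true) := by
          constructor <;> rintro ⟨h', hd⟩ <;> exact ⟨by omega, hd⟩
        rw [if_congr he rfl rfl]
      · rw [if_neg (by omega), if_neg (by omega)]

theorem peAt_succ_set (pr row : List (Option (List (String × String)))) (pe0 : List String) (j : Nat)
    (h : dFlag pr row j = true) (hlen : j < pe0.length) :
    (peAt pr row pe0 j).set j (pvAddEdge ((peAt pr row pe0 j).getD j "") "d")
      = peAt pr row pe0 (j + 1) := by
  apply List.ext_getElem
  · simp [peAt_length]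
  · intro i h1 h2
    simp only [List.length_set, peAt_length] at h1 h2
    rw [List.getElem_set]
    by_cases hij : j = i
    · subst hij
      rw [if_pos rfl, peAt_getD pr row pe0 j hlen, List.getD_eq_getElem _ _ hlen]
      simp only [peAt, List.getElem_mapIdx]
      rw [if_pos (by exact ⟨by omega, h⟩)]
    · rw [if_neg hij]
      simp only [peAt, List.getElem_mapIdx]
      by_cases hlt : i < j
      · have he : (i < j ∧ dFlag pr row i = true) ↔ (i < j + 1 ∧ dFlag pr row i = true) := by
          constructor <;> rintro ⟨h', hd⟩ <;> exact ⟨by omega, hd⟩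
        rw [if_congr he rfl rfl]
      · rw [if_neg (by omega), if_neg (by omega)]

theorem peAt_getElem?_self (pr row : List (Option (List (String × String)))) (pe0 : List String) (j : Nat) :
    (peAt pr row pe0 j)[j]? = pe0[j]? := by
  simp only [peAt, List.getElem?_mapIdx]
  cases h : pe0[j]? with
  | none => rfl
  | some v => simp [if_neg (by omega : ¬ (j < j ∧ dFlag pr row j = true))]

theorem peAt_succ_set' (pr row : List (Option (List (String × String)))) (pe0 : List String) (j : Nat)
    (h : dFlag pr row j = true) (hlen : j < pe0.length) :
    (peAt pr row pe0 j).set j (pvAddEdge (pe0[j]?.getD "") "d") = peAt pr row pe0 (j + 1) := by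
  have h2 := peAt_succ_set pr row pe0 j h hlen
  rwa [peAt_getD pr row pe0 j hlen, List.getD_eq_getElem?_getD] at h2

theorem inner_step (prevRow row : List (Option (List (String × String)))) (w : Nat) (pe0 : List String)
    (hpe : (prevRow = [] ∧ pe0 = []) ∨ (prevRow.length = w ∧ pe0.length = w))
    (j : Nat) (hj : 1 ≤ j) (hjw : j < w) :
    pvInnerStep prevRow (SState prevRow row w pe0 j) (row.getD j none) = SState prevRow row w pe0 (j + 1) := by
  have hj0 : ¬ j = 0 := by omega
  have hjw1 : ¬ (j - 1 = w - 1) := by omega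
  have hjj : j - 1 + 1 = j := Nat.sub_add_cancel hj
  have hlen : prevRow.isEmpty = false → j < pe0.length := by
    intro hem
    rcases hpe with ⟨h1, _⟩ | ⟨_, h2⟩
    · rw [h1] at hem; simp at hem
    · rw [h2]; exact hjw
  have hReq : eR row w (j - 1) = (pvTruthy (row.getD (j - 1) none) &&
      (!pvTruthy (row.getD j none) || (pvColor (row.getD (j - 1) none) == pvColor (row.getD j none)))) := by
    unfold eR; rw [if_neg hjw1, hjj]
  have hUeq : eU prevRow row j = (pvTruthy (row.getD j none) &&
      (!pvTruthy (prevRow.getD j none) || (pvColor (prevRow.getD j none) == pvColor (row.getD j none)))) := rfl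
  have hLeq : eL row j = (!pvTruthy (row.getD (j - 1) none) ||
      (pvTruthy (row.getD j none) && (pvColor (row.getD (j - 1) none) == pvColor (row.getD j none)))) := by
    unfold eL; rw [if_neg hj0]
  have hDeq : dFlag prevRow row j = (!prevRow.isEmpty && (pvTruthy (prevRow.getD j none) &&
      (!pvTruthy (row.getD j none) || (pvColor (prevRow.getD j none) == pvColor (row.getD j none))))) := rfl
  have hemtA : prevRow.isEmpty = true → pvTruthy (prevRow[j]?.getD none) = false := by
    intro he; rw [List.isEmpty_iff.mp he]; rfl
  unfold pvInnerStep SState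
  simp only []
  rw [currAt_getD prevRow row w j j hjw (by omega), if_pos (show 0 < j from hj)]
  simp only [PvAState.mk.injEq]
  refine ⟨?_, ?_, ?_, by norm_num, trivial⟩
  · -- curr component
    rw [← currAt_set prevRow row w j hj (le_of_lt hjw)]
    congr 1
    cases htC : pvTruthy (row[j]?.getD none) <;>
      cases htP : pvTruthy (row[j - 1]?.getD none) <;>
        cases hsP : (pvColor (row[j - 1]?.getD none) == pvColor (row[j]?.getD none)) <;>
          cases hem : prevRow.isEmpty <;>
            cases htA : pvTruthy (prevRow[j]?.getD none) <;>
              cases hsA : (pvColor (prevRow[j]?.getD none) == pvColor (row[j]?.getD none)) <;>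
                first
                  | exact absurd htA (by rw [hemtA hem]; decide)
                  | simp [pendAt, hReq, addEdge_r, htC, htP, hsP, hem, htA, hsA]
  · -- prevEdges component
    cases htC : pvTruthy (row[j]?.getD none) <;>
      cases htP : pvTruthy (row[j - 1]?.getD none) <;>
        cases hsP : (pvColor (row[j - 1]?.getD none) == pvColor (row[j]?.getD none)) <;>
          cases hem : prevRow.isEmpty <;>
            cases htA : pvTruthy (prevRow[j]?.getD none) <;>
              cases hsA : (pvColor (prevRow[j]?.getD none) == pvColor (row[j]?.getD none)) <;>
                simp [htC, htP, hsP, hem, htA, hsA, peAt_getElem?_self] <;>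
                first
                  | exact absurd htA (by rw [hemtA hem]; decide)
                  | exact peAt_succ_set' prevRow row pe0 j
                      (by simp [hDeq, htC, hem, htA, hsA]) (hlen hem)
                  | exact peAt_succ_noset prevRow row pe0 j
                      (by simp [hDeq, htC, hem, htA, hsA])
  · -- prevEdge component
    simp only [Nat.add_sub_cancel]
    cases htC : pvTruthy (row[j]?.getD none) <;>
      cases htP : pvTruthy (row[j - 1]?.getD none) <;>
        cases hsP : (pvColor (row[j - 1]?.getD none) == pvColor (row[j]?.getD none)) <;>
          cases hem : prevRow.isEmpty <;>
            cases htA : pvTruthy (prevRow[j]?.getD none) <;>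
              cases hsA : (pvColor (prevRow[j]?.getD none) == pvColor (row[j]?.getD none)) <;>
                first
                  | exact absurd htA (by rw [hemtA hem]; decide)
                  | simp [pendAt, hUeq, hLeq, zero_bits, addEdge_l, addEdge_u,
                      htC, htP, hsP, hem, htA, hsA]

theorem peAt_zero (pr row : List (Option (List (String × String)))) (pe0 : List String) :
    peAt pr row pe0 0 = pe0 := by
  apply List.ext_getElem
  · simp [peAt_length]
  · intro i h1 h2
    simp only [peAt, List.getElem_mapIdx]
    rw [if_neg (by omega)]

theorem inner_base (prevRow row : List (Option (List (String × String)))) (w : Nat) (pe0 : List String)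
    (hpe : (prevRow = [] ∧ pe0 = []) ∨ (prevRow.length = w ∧ pe0.length = w)) (hw : 0 < w) :
    pvInnerStep prevRow ⟨List.replicate w "0000", pe0, none, none, 0⟩ (row.getD 0 none) = SState prevRow row w pe0 1 := by
  have hlen : prevRow.isEmpty = false → 0 < pe0.length := by
    intro hem
    rcases hpe with ⟨h1, _⟩ | ⟨_, h2⟩
    · rw [h1] at hem; simp at hem
    · rw [h2]; exact hw
  have hemtA : prevRow.isEmpty = true → pvTruthy (prevRow[0]?.getD none) = false := by
    intro he; rw [List.isEmpty_iff.mp he]; rfl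
  have hL0 : eL row 0 = true := rfl
  have hU0 : eU prevRow row 0 = (pvTruthy (row.getD 0 none) &&
      (!pvTruthy (prevRow.getD 0 none) || (pvColor (prevRow.getD 0 none) == pvColor (row.getD 0 none)))) := rfl
  have hD0 : dFlag prevRow row 0 = (!prevRow.isEmpty && (pvTruthy (prevRow.getD 0 none) &&
      (!pvTruthy (row.getD 0 none) || (pvColor (prevRow.getD 0 none) == pvColor (row.getD 0 none))))) := rfl
  unfold pvInnerStep SState
  simp only []
  rw [if_neg (show ¬ (0:Nat) < 0 by omega)]
  have hce0 : (List.replicate w "0000").getD 0 "" = "0000" := by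
    rw [List.getD_eq_getElem _ _ (by simpa using hw)]
    simp
  rw [hce0]
  have hPn : pvTruthy none = false := rfl
  simp only [PvAState.mk.injEq]
  refine ⟨?_, ?_, ?_, trivial, trivial⟩
  · -- curr component: untouched replicate = currAt 1
    apply List.ext_getElem
    · simp [currAt_length]
    · intro i h1 h2
      simp only [currAt, List.getElem_map, List.getElem_range, List.getElem_replicate]
      rw [if_neg (by omega)]
  · -- prevEdges component
    cases htC : pvTruthy (row[0]?.getD none) <;>
      cases hem : prevRow.isEmpty <;>
        cases htA : pvTruthy (prevRow[0]?.getD none) <;>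
          cases hsA : (pvColor (prevRow[0]?.getD none) == pvColor (row[0]?.getD none)) <;>
            simp [htC, hem, htA, hsA, hPn, peAt_getElem?_self] <;>
            first
              | exact absurd htA (by rw [hemtA hem]; decide)
              | (have hx := peAt_succ_set' prevRow row pe0 0
                    (by simp [hD0, htC, hem, htA, hsA]) (hlen hem)
                 rwa [peAt_zero] at hx)
              | (have hx := peAt_succ_noset prevRow row pe0 0
                    (by simp [hD0, htC, hem, htA, hsA])
                 rwa [peAt_zero] at hx)
  · -- prevEdge component
    cases htC : pvTruthy (row[0]?.getD none) <;>
      cases hem : prevRow.isEmpty <;>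
        cases htA : pvTruthy (prevRow[0]?.getD none) <;>
          cases hsA : (pvColor (prevRow[0]?.getD none) == pvColor (row[0]?.getD none)) <;>
            first
              | exact absurd htA (by rw [hemtA hem]; decide)
              | simp [pendAt, hU0, hL0, zero_bits, addEdge_l, addEdge_u, hPn,
                  htC, htA, hsA]

theorem inner_full (prevRow row : List (Option (List (String × String)))) (w : Nat) (pe0 : List String)
    (hrow : row.length = w) (hw : 0 < w)
    (hpe : (prevRow = [] ∧ pe0 = []) ∨ (prevRow.length = w ∧ pe0.length = w)) :
    List.foldl (pvInnerStep prevRow) ⟨List.replicate w "0000", pe0, none, none, 0⟩ row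
      = SState prevRow row w pe0 w := by
  have go : ∀ (suf : List (Option (List (String × String)))) (j : Nat), 1 ≤ j →
      j + suf.length = w → suf = row.drop j →
      List.foldl (pvInnerStep prevRow) (SState prevRow row w pe0 j) suf = SState prevRow row w pe0 w := by
    intro suf
    induction suf with
    | nil =>
      intro j hj hjw _
      simp only [List.length_nil, Nat.add_zero] at hjw
      rw [hjw, List.foldl_nil]
    | cons c suf' ih =>
      intro j hj hjw hdrop
      have hjlt : j < w := by simp only [List.length_cons] at hjw; omega
      have hcell : row.getD j none = c := by
        have h0 : row[j]? = (row.drop j)[0]? := by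
          rw [List.getElem?_drop]
          norm_num
        rw [List.getD_eq_getElem?_getD, h0, ← hdrop]
        rfl
      have hsuf' : suf' = row.drop (j + 1) := by
        have h1 : row.drop (j + 1) = (row.drop j).drop 1 := by
          rw [List.drop_drop, Nat.add_comm]
        rw [h1, ← hdrop]
        rfl
      rw [List.foldl_cons, ← hcell, inner_step prevRow row w pe0 hpe j hj hjlt]
      exact ih (j + 1) (by omega) (by simp only [List.length_cons] at hjw; omega) hsuf'
  cases row with
  | nil => simp at hrow; omega
  | cons c rest =>
    rw [List.foldl_cons]
    have hbase : pvInnerStep prevRow ⟨List.replicate w "0000", pe0, none, none, 0⟩ c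
        = SState prevRow (c :: rest) w pe0 1 := by
      have hc : c = (c :: rest).getD 0 none := rfl
      conv_lhs => rw [hc]
      exact inner_base prevRow (c :: rest) w pe0 hpe hw
    rw [hbase]
    exact go rest 1 (le_refl 1) (by simp at hrow; omega) rfl

theorem rowCode_length (pr row : List (Option (List (String × String)))) (w : Nat) :
    (rowCode pr row w).length = w := by simp [rowCode]

theorem eR_last (row : List (Option (List (String × String)))) (w : Nat) :
    eR row w (w - 1) = true := by unfold eR; rw [if_pos rfl]

theorem currAt_full (pr row : List (Option (List (String × String)))) (w : Nat) :
    currAt pr row w (w + 1) = rowCode pr row w := by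
  unfold currAt rowCode
  apply List.map_congr_left
  intro c hc
  rw [List.mem_range] at hc
  rw [if_pos (by omega)]

theorem peAt_full (pp prevRow row : List (Option (List (String × String)))) (w : Nat)
    (hw : 0 < w) (hpr : prevRow.length = w) :
    peAt prevRow row (rowCode pp prevRow w) w = finalRow w pp prevRow (some row) := by
  have hne : prevRow.isEmpty = false := by
    rw [List.isEmpty_eq_false_iff_exists_mem]
    cases prevRow with
    | nil => simp at hpr; omega
    | cons a l => exact ⟨a, List.mem_cons_self⟩
  apply List.ext_getElem
  · simp [peAt_length, rowCode_length, finalRow]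
  · intro i h1 h2
    simp only [peAt_length, rowCode_length] at h1
    simp only [peAt, List.getElem_mapIdx, rowCode, finalRow, List.getElem_map, List.getElem_range]
    cases hd : eD prevRow row i with
    | false => rw [if_neg (by simp [dFlag, hd])]
    | true =>
      rw [if_pos ⟨h1, by simp [dFlag, hd, hne]⟩]
      exact addEdge_d _ _ _

theorem mapd_rowCode (pp prevRow : List (Option (List (String × String)))) (w : Nat) :
    (rowCode pp prevRow w).map (fun e => pvAddEdge e "d") = finalRow w pp prevRow none := by
  unfold rowCode finalRow
  rw [List.map_map]
  apply List.map_congr_left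
  intro c _
  exact addEdge_d _ _ _

theorem outer_step_eq (w : Nat) (hw : 0 < w) (acc : List (List String))
    (pp prevRow row : List (Option (List (String × String))))
    (hrow : row.length = w) (hpr : prevRow.length = w) :
    pvOuterStep w ⟨acc, rowCode pp prevRow w, prevRow⟩ row
      = ⟨acc ++ [finalRow w pp prevRow (some row)], rowCode prevRow row w, row⟩ := by
  unfold pvOuterStep
  simp only []
  rw [inner_full prevRow row w (rowCode pp prevRow w) hrow hw
      (Or.inr ⟨hpr, rowCode_length pp prevRow w⟩)]
  unfold SState
  simp only []
  rw [peAt_full pp prevRow row w hw hpr]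
  have hie : (finalRow w pp prevRow (some row)).isEmpty = false := by
    rw [List.isEmpty_eq_false_iff_exists_mem]
    have : (finalRow w pp prevRow (some row)).length = w := by simp [finalRow]
    cases hfr : finalRow w pp prevRow (some row) with
    | nil => rw [hfr] at this; simp at this; omega
    | cons a l => exact ⟨a, List.mem_cons_self⟩
  rw [hie]
  simp only [Option.map_some, Option.getD_some, Bool.false_eq_true, if_false]
  have hval : pvAddEdge (pendAt prevRow row (w - 1)) "r"
      = pvBits (eU prevRow row (w - 1)) (eL row (w - 1)) false (eR row w (w - 1)) := by
    rw [eR_last, pendAt, addEdge_r]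
  rw [hval, currAt_set prevRow row w w hw (le_refl w), currAt_full]

theorem outer_go (w : Nat) (hw : 0 < w) :
    ∀ (rows : List (List (Option (List (String × String))))) (acc : List (List String))
      (pp prevRow : List (Option (List (String × String)))),
      (∀ r ∈ rows, r.length = w) → prevRow.length = w →
      (let fin := List.foldl (pvOuterStep w) ⟨acc, rowCode pp prevRow w, prevRow⟩ rows
       fin.edgeGrid ++ [fin.prevEdgesRow.map (fun e => pvAddEdge e "d")])
      = acc ++ finalRow w pp prevRow rows.head? :: rowsB w prevRow rows := by
  intro rows
  induction rows with
  | nil =>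
    intro acc pp prevRow _ _
    simp only [List.foldl_nil, rowsB]
    rw [mapd_rowCode]
    rfl
  | cons row rows' ih =>
    intro acc pp prevRow hlens hpr
    have hrow : row.length = w := hlens row List.mem_cons_self
    simp only [List.foldl_cons]
    rw [outer_step_eq w hw acc pp prevRow row hrow hpr]
    rw [ih (acc ++ [finalRow w pp prevRow (some row)]) prevRow row
        (fun r hr => hlens r (List.mem_cons_of_mem _ hr)) hrow]
    simp [rowsB]

theorem altRow_go (grid : List (List (Option (List (String × String))))) (h w r : Nat)
    (row : List (Option (List (String × String)))) :
    ∀ (sufc : List (Option (List (String × String)))) (c : Nat), sufc = row.drop c →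
      pvAltRow grid h w r row c sufc
        = (List.range' c sufc.length).map (fun i => pvBCell grid h w r row i (row.getD i none)) := by
  intro sufc
  induction sufc with
  | nil => intro c _; rfl
  | cons x rest ih =>
    intro c hdrop
    have hx : row.getD c none = x := by
      rw [List.getD_eq_getElem?_getD]
      have h0 : row[c]? = (row.drop c)[0]? := by rw [List.getElem?_drop]; norm_num
      rw [h0, ← hdrop]
      rfl
    have hrest : rest = row.drop (c + 1) := by
      have h1 : row.drop (c + 1) = (row.drop c).drop 1 := by rw [List.drop_drop, Nat.add_comm]
      rw [h1, ← hdrop]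
      rfl
    simp only [pvAltRow, List.length_cons, List.range'_succ, List.map_cons]
    rw [hx, ih (c + 1) hrest]

theorem bcell_eq (grid : List (List (Option (List (String × String))))) (w j : Nat)
    (row : List (Option (List (String × String))))
    (hj : grid[j]? = some row) (hw : 0 < w) (hrow : row.length = w)
    (rest : List (List (Option (List (String × String))))) (hrest : rest = grid.drop (j + 1))
    (c : Nat) (hc : c < w) :
    pvBCell grid grid.length w j row c (row.getD c none)
      = pvBits (eU (if j = 0 then [] else grid.getD (j - 1) []) row c) (eL row c)
          (match rest.head? with | none => true | some nr => eD row nr c) (eR row w c) := by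
  have hjh : j < grid.length := by
    by_contra hcon
    rw [List.getElem?_eq_none (by omega)] at hj
    simp at hj
  unfold pvBCell
  simp only []
  have hu : (pvTruthy (row.getD c none) &&
      (!pvTruthy (if 0 < j then (grid.getD (j - 1) []).getD c none else none) ||
        (pvColor (if 0 < j then (grid.getD (j - 1) []).getD c none else none) == pvColor (row.getD c none))))
      = eU (if j = 0 then [] else grid.getD (j - 1) []) row c := by
    by_cases hj0 : j = 0
    · subst hj0
      rw [if_neg (by omega), if_pos rfl]
      rfl
    · rw [if_pos (by omega), if_neg hj0]
      rfl
  have hl : (!pvTruthy (if 0 < c then row.getD (c - 1) none else none) ||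
      (pvTruthy (row.getD c none) &&
        (pvColor (if 0 < c then row.getD (c - 1) none else none) == pvColor (row.getD c none))))
      = eL row c := by
    unfold eL
    by_cases hc0 : c = 0
    · subst hc0; rw [if_neg (by omega), if_pos rfl]
    · rw [if_pos (by omega), if_neg hc0]
  have hr : (decide (c = w - 1) ||
      (pvTruthy (row.getD c none) &&
        (!pvTruthy (if c < w - 1 then row.getD (c + 1) none else none) ||
          (pvColor (if c < w - 1 then row.getD (c + 1) none else none) == pvColor (row.getD c none)))))
      = eR row w c := by
    unfold eR
    by_cases hcw : c = w - 1
    · rw [if_pos hcw]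
      simp [hcw]
    · rw [if_neg hcw, if_pos (by omega)]
      simp only [decide_eq_false hcw, Bool.false_or]
      rw [pvColor_comm]
  have hd : (decide (j = grid.length - 1) ||
      (pvTruthy (row.getD c none) &&
        (!pvTruthy (if j < grid.length - 1 then (grid.getD (j + 1) []).getD c none else none) ||
          (pvColor (if j < grid.length - 1 then (grid.getD (j + 1) []).getD c none else none) ==
            pvColor (row.getD c none)))))
      = (match rest.head? with | none => true | some nr => eD row nr c) := by
    cases hre : rest with
    | nil =>
      have hjl : j = grid.length - 1 := by
        rw [hre] at hrest
        have := congrArg List.length hrest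
        simp only [List.length_nil, List.length_drop] at this
        omega
      simp [hjl]
    | cons nr rest' =>
      have hjl : j + 1 < grid.length := by
        have := congrArg List.length hrest
        rw [hre] at this
        simp only [List.length_cons, List.length_drop] at this
        omega
      have hnr : grid.getD (j + 1) [] = nr := by
        rw [List.getD_eq_getElem?_getD]
        have h0 : grid[j + 1]? = (grid.drop (j + 1))[0]? := by
          rw [List.getElem?_drop]
        rw [h0, ← hrest, hre]
        rfl
      simp only [List.head?_cons]
      rw [decide_eq_false (by omega : ¬ j = grid.length - 1), if_pos (by omega), hnr]
      unfold eD
      rw [pvColor_comm]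
      rfl
  rw [hu, hl, hr, hd]

theorem alt_go (grid : List (List (Option (List (String × String))))) (w : Nat) (hw : 0 < w)
    (hlens : ∀ row ∈ grid, row.length = w) :
    ∀ (suf : List (List (Option (List (String × String))))) (j : Nat), suf = grid.drop j →
      pvAltRows grid grid.length w j suf
        = rowsB w (if j = 0 then [] else grid.getD (j - 1) []) suf := by
  intro suf
  induction suf with
  | nil => intro j _; rfl
  | cons row rest ih =>
    intro j hdrop
    have hj : grid[j]? = some row := by
      have h0 : grid[j]? = (grid.drop j)[0]? := by rw [List.getElem?_drop]; norm_num
      rw [h0, ← hdrop]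
      rfl
    have hrest : rest = grid.drop (j + 1) := by
      have h1 : grid.drop (j + 1) = (grid.drop j).drop 1 := by rw [List.drop_drop, Nat.add_comm]
      rw [h1, ← hdrop]
      rfl
    have hrow : row.length = w := hlens row (List.mem_of_getElem? hj)
    have hgj : grid.getD j [] = row := by
      rw [List.getD_eq_getElem?_getD, hj]
      rfl
    simp only [pvAltRows, rowsB]
    congr 1
    · rw [altRow_go grid grid.length w j row row 0 rfl, hrow]
      rw [← List.range_eq_range']
      unfold finalRow
      apply List.map_congr_left
      intro c hc
      rw [List.mem_range] at hc
      exact bcell_eq grid w j row hj hw hrow rest hrest c hc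
    · rw [ih (j + 1) hrest]
      rw [if_neg (by omega)]
      have hgj2 : grid.getD (j + 1 - 1) [] = row := by
        norm_num
        rw [hj]
        rfl
      rw [hgj2]

theorem outer_first (w : Nat) (hw : 0 < w) (row0 : List (Option (List (String × String))))
    (hrow : row0.length = w) :
    pvOuterStep w ⟨[], [], []⟩ row0 = ⟨[], rowCode [] row0 w, row0⟩ := by
  unfold pvOuterStep
  simp only []
  rw [inner_full [] row0 w [] hrow hw (Or.inl ⟨rfl, rfl⟩)]
  unfold SState
  simp only []
  have hval : pvAddEdge (pendAt [] row0 (w - 1)) "r"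
      = pvBits (eU [] row0 (w - 1)) (eL row0 (w - 1)) false (eR row0 w (w - 1)) := by
    rw [eR_last, pendAt, addEdge_r]
  simp only [Option.map_some, Option.getD_some]
  rw [hval, currAt_set [] row0 w w hw (le_refl w), currAt_full]
  rfl

theorem a_side (grid : List (List (Option (List (String × String))))) (hne : grid ≠ [])
    (hw : 0 < (grid.headD []).length)
    (hlen : ∀ row ∈ grid, row.length = (grid.headD []).length) :
    get_edge_grid grid = rowsB (grid.headD []).length [] grid := by
  cases grid with
  | nil => exact absurd rfl hne
  | cons row0 rest =>
    simp only [List.headD_cons] at hw hlen ⊢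
    unfold get_edge_grid
    simp only [List.headD_cons, List.foldl_cons]
    rw [outer_first row0.length hw row0 rfl]
    rw [outer_go row0.length hw rest [] [] row0
        (fun r hr => hlen r (List.mem_cons_of_mem _ hr)) rfl]
    simp [rowsB]

theorem b_side (grid : List (List (Option (List (String × String)))))
    (hw : 0 < (grid.headD []).length)
    (hlen : ∀ row ∈ grid, row.length = (grid.headD []).length) :
    get_edge_grid_alt grid = rowsB (grid.headD []).length [] grid := by
  unfold get_edge_grid_alt
  rw [alt_go grid (grid.headD []).length hw hlen grid 0 (List.drop_zero.symm)]
  rw [if_pos rfl]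

-- ===== VERDICT (by name: the statement is the Claim_ definition above) =====
theorem get_edge_grid_spec : Claim_equal_get_edge_grid := by
  intro grid _hdom hpre
  obtain ⟨hne, hw, hlen, -, -⟩ := hpre
  unfold Spec_get_edge_grid
  rw [a_side grid hne hw hlen, b_side grid hw hlen]
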